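-- pv_equiv track=rewrite | github.com/winslowb/aws-stuff | fips/aws-commons-fips.py | get_instance_details
-- ===== SOURCE A (Python) =====
-- def get_instance_details(tags):
--     """Extract details from instance tags, identifying EKS nodes and their cluster names."""
--     details = {'Type': 'General Purpose EC2', 'ClusterName': 'N/A'}
--     for tag in tags:
--         if tag['Key'].startswith('kubernetes.io/cluster/'):
--             details['Type'] = 'EKS Node'
--             details['ClusterName'] = tag['Key'].split('/')[-1]
--         elif tag['Key'] == 'Name':
--             details['Name'] = tag['Value']
--     return details
-- ===== SOURCE B (Python) =====
-- def get_instance_details(tags):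
--     """Extract details from instance tags, identifying EKS nodes and their cluster names."""
--     prefix = 'kubernetes.io/cluster/'
--     cluster_keys = [t['Key'] for t in tags if t['Key'].startswith(prefix)]
--     name_values = [t['Value'] for t in tags if t['Key'] == 'Name']
--     if cluster_keys:
--         details = {'Type': 'EKS Node', 'ClusterName': cluster_keys[-1].split('/')[-1]}
--     else:
--         details = {'Type': 'General Purpose EC2', 'ClusterName': 'N/A'}
--     if name_values:
--         details['Name'] = name_values[-1]
--     return details
-- ===== Notes on version B (the rewrite author's own statement) =====
-- stated objective: simpler
-- what changed: Replaces the single stateful last-wins loop by two declarative filtering passes (cluster-tag keys and Name-tag values) whose last elements fill in the three fields.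
import Mathlib
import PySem

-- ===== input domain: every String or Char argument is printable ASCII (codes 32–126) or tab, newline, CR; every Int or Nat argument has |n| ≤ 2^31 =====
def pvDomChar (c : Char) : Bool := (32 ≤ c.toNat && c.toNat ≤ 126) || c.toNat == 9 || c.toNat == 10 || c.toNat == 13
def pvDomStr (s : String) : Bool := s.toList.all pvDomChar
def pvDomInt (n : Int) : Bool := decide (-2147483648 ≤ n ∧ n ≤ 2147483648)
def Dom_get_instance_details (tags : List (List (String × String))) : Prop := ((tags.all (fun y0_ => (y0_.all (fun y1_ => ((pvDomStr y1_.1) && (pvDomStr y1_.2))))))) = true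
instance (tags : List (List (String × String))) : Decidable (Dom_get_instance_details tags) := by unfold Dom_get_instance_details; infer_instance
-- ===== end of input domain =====

-- B changes the decomposition: A's single stateful last-wins loop becomes two filtering passes;
-- same return value wherever A returns (Pre_ excludes exactly A's KeyErrors).

-- shared helper: tag['K'] lookup (first match; "" only where Python raises, excluded by Pre_)
def pvTagGet (t : List (String × String)) (k : String) : String :=
  ((PySem.Dict.mk t).get? k).getD ""

-- key.split('/')[-1]  ('/' is non-empty, so split? is some; a split is never [])
def pvLastSeg (k : String) : String :=
  (((PySem.Str.split? k "/").getD []).getLast?).getD ""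

-- ===== PORT A =====
def pvStepA (d : PySem.Dict String String) (t : List (String × String)) : PySem.Dict String String :=
  if PySem.Str.startswith (pvTagGet t "Key") "kubernetes.io/cluster/" then
    (d.insert "Type" "EKS Node").insert "ClusterName" (pvLastSeg (pvTagGet t "Key"))
  else if pvTagGet t "Key" = "Name" then
    d.insert "Name" (pvTagGet t "Value")
  else d

def get_instance_details (tags : List (List (String × String))) : List (String × String) :=
  (tags.foldl pvStepA (PySem.Dict.mk [("Type", "General Purpose EC2"), ("ClusterName", "N/A")])).items

-- ===== PORT B =====
def get_instance_details_alt (tags : List (List (String × String))) : List (String × String) :=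
  let clusterKeys := tags.filterMap (fun t =>
    if PySem.Str.startswith (pvTagGet t "Key") "kubernetes.io/cluster/" then some (pvTagGet t "Key") else none)
  let nameValues := tags.filterMap (fun t =>
    if pvTagGet t "Key" = "Name" then some (pvTagGet t "Value") else none)
  let details : PySem.Dict String String :=
    match clusterKeys.getLast? with
    | some k => PySem.Dict.mk [("Type", "EKS Node"), ("ClusterName", pvLastSeg k)]
    | none => PySem.Dict.mk [("Type", "General Purpose EC2"), ("ClusterName", "N/A")]
  (match nameValues.getLast? with
   | some v => details.insert "Name" v
   | none => details).items

-- ===== PRECONDITION & SPEC =====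
-- Pre_ excludes exactly the inputs where Python A raises KeyError: a tag without a 'Key' entry,
-- or a tag with Key == 'Name' but no 'Value' entry.
def Pre_get_instance_details (tags : List (List (String × String))) : Prop :=
  ∀ t ∈ tags, ((PySem.Dict.mk t).get? "Key").isSome = true ∧
    ((PySem.Dict.mk t).get? "Key" = some "Name" → ((PySem.Dict.mk t).get? "Value").isSome = true)
instance (tags : List (List (String × String))) : Decidable (Pre_get_instance_details tags) := by
  unfold Pre_get_instance_details; infer_instance

def pvWitness_get_instance_details : (List (List (String × String))) :=
  [[("Key", "kubernetes.io/cluster/mycluster"), ("Value", "owned")], [("Key", "Name"), ("Value", "node-1")]]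

def Spec_get_instance_details (tags : List (List (String × String))) (out : List (String × String)) : Prop := out = get_instance_details_alt tags
instance (tags : List (List (String × String))) (out : List (String × String)) : Decidable (Spec_get_instance_details tags out) := by unfold Spec_get_instance_details; infer_instance

-- ===== CLAIM (what is proved, stated in full; the proofs are below) =====
def Claim_equal_get_instance_details : Prop := ∀ (tags : List (List (String × String))), Dom_get_instance_details tags → Pre_get_instance_details tags → Spec_get_instance_details tags (get_instance_details tags)

-- ===== LEMMAS AND PROOFS =====

-- canonical shape of A's loop state: Type, ClusterName, and an optional Name entry
def pvSt (T C : String) (N : Option String) : PySem.Dict String String :=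
  match N with
  | none => PySem.Dict.mk [("Type", T), ("ClusterName", C)]
  | some v => PySem.Dict.mk [("Type", T), ("ClusterName", C), ("Name", v)]

theorem pvStepA_st (T C : String) (N : Option String) (t : List (String × String)) :
    pvStepA (pvSt T C N) t =
      if PySem.Str.startswith (pvTagGet t "Key") "kubernetes.io/cluster/" then
        pvSt "EKS Node" (pvLastSeg (pvTagGet t "Key")) N
      else if pvTagGet t "Key" = "Name" then
        pvSt T C (some (pvTagGet t "Value"))
      else pvSt T C N := by
  cases N <;>
    simp only [pvStepA, pvSt] <;> split_ifs <;> rfl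

theorem pvGetLast?_cons {α : Type} (a : α) (l : List α) :
    (a :: l).getLast? = (l.getLast?).or (some a) := by
  induction l generalizing a with
  | nil => rfl
  | cons b m ih => rw [List.getLast?_cons_cons, ih b]; cases m.getLast? <;> rfl

theorem pvGetLast?_cons_or {α : Type} (a : α) (l : List α) (N : Option α) :
    ((a :: l).getLast?).or N = (l.getLast?).or (some a) := by
  rw [pvGetLast?_cons a l]; cases l.getLast? <;> rfl

theorem pvFold (ts : List (List (String × String))) (T C : String) (N : Option String) :
    ts.foldl pvStepA (pvSt T C N) =
      pvSt
        (match (ts.filterMap (fun t =>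
            if PySem.Str.startswith (pvTagGet t "Key") "kubernetes.io/cluster/" then some (pvTagGet t "Key") else none)).getLast? with
         | some _ => "EKS Node" | none => T)
        (match (ts.filterMap (fun t =>
            if PySem.Str.startswith (pvTagGet t "Key") "kubernetes.io/cluster/" then some (pvTagGet t "Key") else none)).getLast? with
         | some k => pvLastSeg k | none => C)
        (((ts.filterMap (fun t =>
            if pvTagGet t "Key" = "Name" then some (pvTagGet t "Value") else none)).getLast?).or N) := by
  induction ts generalizing T C N with
  | nil => rfl
  | cons t ts ih =>
    simp only [List.foldl_cons, pvStepA_st, List.filterMap_cons]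
    by_cases h1 : PySem.Str.startswith (pvTagGet t "Key") "kubernetes.io/cluster/" = true
    · have h2 : ¬ pvTagGet t "Key" = "Name" := by
        intro he; rw [he] at h1; exact absurd h1 (by decide)
      simp only [h1, if_true, h2, ite_false, ih, pvGetLast?_cons]
      cases hcs : (ts.filterMap (fun t =>
          if PySem.Str.startswith (pvTagGet t "Key") "kubernetes.io/cluster/" then some (pvTagGet t "Key") else none)).getLast? <;>
        simp [hcs]
    · rw [if_neg h1, if_neg h1]
      by_cases h2 : pvTagGet t "Key" = "Name"
      · rw [if_pos h2, if_pos h2, ih, pvGetLast?_cons_or]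
      · rw [if_neg h2, if_neg h2, ih]

-- ===== VERDICT (by name: the statement is the Claim_ definition above) =====
theorem get_instance_details_spec : Claim_equal_get_instance_details := by
  intro tags _ _
  unfold Spec_get_instance_details get_instance_details
  have h0 : (PySem.Dict.mk [("Type", "General Purpose EC2"), ("ClusterName", "N/A")]) =
      pvSt "General Purpose EC2" "N/A" none := rfl
  rw [h0, pvFold]
  cases hcs : (tags.filterMap (fun t =>
      if PySem.Str.startswith (pvTagGet t "Key") "kubernetes.io/cluster/" then some (pvTagGet t "Key") else none)).getLast? <;>
    cases hns : (tags.filterMap (fun t =>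
      if pvTagGet t "Key" = "Name" then some (pvTagGet t "Value") else none)).getLast? <;>
    simp only [get_instance_details_alt, hcs, hns] <;> rfl
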